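-- pv_equiv track=rewrite | github.com/jso122-2/DAWN-19-9-25 | dawn/subsystems/mood/blend.py | blend_moods
-- ===== SOURCE A (Python) =====
-- from collections import Counter
--
-- MOOD_HIERARCHY = [
--     "joyful", "focused", "reflective", "anxious", "sad"
-- ]
--
-- def blend_moods(source_blooms):
--     """Legacy mood blending function"""
--     moods = [bloom.get("mood", "undefined") for bloom in source_blooms]
--     mood_counts = Counter(moods)
--
--     if not mood_counts:
--         return "undefined"
--
--     # Find highest priority mood by presence in source set
--     for mood in MOOD_HIERARCHY:
--         if mood in mood_counts:
--             return mood
--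
--     return moods[0] if moods else "undefined"  # fallback
-- ===== SOURCE B (Python) =====
-- MOOD_HIERARCHY = [
--     "joyful", "focused", "reflective", "anxious", "sad"
-- ]
--
-- def blend_moods(source_blooms):
--     """Priority-table mood blending: one pass over the input moods."""
--     moods = [bloom.get("mood", "undefined") for bloom in source_blooms]
--     if not moods:
--         return "undefined"
--     priority = {m: i for i, m in enumerate(MOOD_HIERARCHY)}
--     n = len(MOOD_HIERARCHY)
--     best = moods[0]
--     best_p = priority.get(best, n)
--     for m in moods[1:]:
--         p = priority.get(m, n)
--         if p < best_p:
--             best, best_p = m, p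
--     return best
-- ===== Notes on version B (the rewrite author's own statement) =====
-- stated objective: alternative
-- what changed: Instead of building a Counter and scanning the fixed hierarchy for the first mood present, B precomputes a mood->index priority table and makes one strict-min pass over the input moods (unknown moods get sentinel priority len(MOOD_HIERARCHY)), so the first mood of minimal priority is returned directly.
import Mathlib
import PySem

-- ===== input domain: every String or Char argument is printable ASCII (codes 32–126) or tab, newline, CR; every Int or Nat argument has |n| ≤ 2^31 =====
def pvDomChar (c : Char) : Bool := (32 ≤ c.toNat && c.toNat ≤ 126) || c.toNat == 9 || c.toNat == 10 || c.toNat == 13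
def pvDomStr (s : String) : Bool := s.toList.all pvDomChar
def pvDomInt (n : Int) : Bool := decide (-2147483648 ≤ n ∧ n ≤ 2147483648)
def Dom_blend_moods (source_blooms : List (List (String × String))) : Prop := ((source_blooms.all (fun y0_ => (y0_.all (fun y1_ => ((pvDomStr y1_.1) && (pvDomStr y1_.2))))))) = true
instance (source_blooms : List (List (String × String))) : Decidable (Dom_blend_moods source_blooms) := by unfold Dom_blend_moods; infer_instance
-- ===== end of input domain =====

-- B replaces A's Counter + scan of the fixed hierarchy by a precomputed mood→index
-- priority table and one strict-min pass over the input moods (objective: alternative).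

def pvMoodHierarchy : List String := ["joyful", "focused", "reflective", "anxious", "sad"]

-- ===== PORT A =====
-- the 'for mood in MOOD_HIERARCHY: if mood in mood_counts: return mood' loop
def pvFindMood (counts : PySem.Dict String Int) : List String → Option String
  | [] => none
  | mood :: rest => if counts.contains mood then some mood else pvFindMood counts rest

def blend_moods (source_blooms : List (List (String × String))) : String :=
  let moods := source_blooms.map (fun bloom => (PySem.Dict.mk bloom).getD "mood" "undefined")
  let mood_counts := PySem.Dict.counter moods
  if mood_counts.items.isEmpty then "undefined"
  else
    match pvFindMood mood_counts pvMoodHierarchy with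
    | some mood => mood
    | none =>
        match moods with
        | [] => "undefined"
        | m :: _ => m

-- ===== PORT B =====
def blend_moods_alt (source_blooms : List (List (String × String))) : String :=
  let moods := source_blooms.map (fun bloom => (PySem.Dict.mk bloom).getD "mood" "undefined")
  match moods with
  | [] => "undefined"
  | m0 :: rest =>
      let priority := PySem.Dict.ofList ((PySem.List.enumerate pvMoodHierarchy).map (fun p => (p.2, p.1)))
      let n := PySem.List.len pvMoodHierarchy
      let r := rest.foldl (fun acc m =>
          let p := priority.getD m n
          if p < acc.2 then (m, p) else acc) (m0, priority.getD m0 n)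
      r.1

-- ===== PRECONDITION & SPEC =====
def Spec_blend_moods (source_blooms : List (List (String × String))) (out : String) : Prop := out = blend_moods_alt source_blooms
instance (source_blooms : List (List (String × String))) (out : String) : Decidable (Spec_blend_moods source_blooms out) := by unfold Spec_blend_moods; infer_instance

-- ===== CLAIM (what is proved, stated in full; the proofs are below) =====
def Claim_equal_blend_moods : Prop := ∀ (source_blooms : List (List (String × String))), Dom_blend_moods source_blooms → Spec_blend_moods source_blooms (blend_moods source_blooms)

-- ===== LEMMAS AND PROOFS =====

-- priority of a mood: its index in the hierarchy, 5 if absent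
def pvPri (m : String) : Int :=
  if m = "joyful" then 0 else if m = "focused" then 1 else if m = "reflective" then 2
  else if m = "anxious" then 3 else if m = "sad" then 4 else 5

def pvStep (acc : String × Int) (m : String) : String × Int :=
  if pvPri m < acc.2 then (m, pvPri m) else acc

lemma pvPri_getD (m : String) :
    (PySem.Dict.ofList ((PySem.List.enumerate pvMoodHierarchy).map (fun p => (p.2, p.1)))).getD m
      (PySem.List.len pvMoodHierarchy) = pvPri m := by
  have h : (PySem.Dict.ofList ((PySem.List.enumerate pvMoodHierarchy).map (fun p => (p.2, p.1))))
      = PySem.Dict.mk [("joyful",(0:Int)),("focused",1),("reflective",2),("anxious",3),("sad",4)] := by decide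
  rw [h]
  show (PySem.Dict.mk _).getD m (5:Int) = _
  unfold pvPri
  split_ifs with h0 h1 h2 h3 h4
  · subst h0; decide
  · subst h1; decide
  · subst h2; decide
  · subst h3; decide
  · subst h4; decide
  · simp only [PySem.Dict.getD_eq_get?_getD, PySem.Dict.get?_mk_cons, beq_iff_eq]
    rw [if_neg (fun h => h0 h.symm), if_neg (fun h => h1 h.symm), if_neg (fun h => h2 h.symm),
        if_neg (fun h => h3 h.symm), if_neg (fun h => h4 h.symm)]
    rfl

lemma pvPri_bounds (m : String) : (0:Int) ≤ pvPri m ∧ pvPri m ≤ 5 := by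
  unfold pvPri; split_ifs <;> norm_num

lemma pvPri_val (x : String) :
    (pvPri x = 0 → x = "joyful") ∧ (pvPri x = 1 → x = "focused") ∧ (pvPri x = 2 → x = "reflective")
    ∧ (pvPri x = 3 → x = "anxious") ∧ (pvPri x = 4 → x = "sad") := by
  unfold pvPri; split_ifs <;> norm_num <;> simp_all

lemma pvFold_inv (l : List String) : ∀ (b : String),
    ((l.foldl pvStep (b, pvPri b)).2 = pvPri (l.foldl pvStep (b, pvPri b)).1)
    ∧ (l.foldl pvStep (b, pvPri b)).1 ∈ b :: l
    ∧ ∀ m ∈ b :: l, (l.foldl pvStep (b, pvPri b)).2 ≤ pvPri m := by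
  induction l with
  | nil =>
      intro b
      refine ⟨rfl, by simp, ?_⟩
      intro m hm
      simp only [List.mem_cons, List.not_mem_nil, or_false] at hm
      subst hm; exact le_refl _
  | cons x l ih =>
      intro b
      by_cases hx : pvPri x < pvPri b
      · have hstep : pvStep (b, pvPri b) x = (x, pvPri x) := by simp [pvStep, hx]
        simp only [List.foldl_cons, hstep]
        obtain ⟨h1, h2, h3⟩ := ih x
        refine ⟨h1, ?_, ?_⟩
        · rcases List.mem_cons.mp h2 with h | h
          · rw [h]; exact List.mem_cons_of_mem _ List.mem_cons_self
          · exact List.mem_cons_of_mem _ (List.mem_cons_of_mem _ h)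
        · intro m hm
          rcases List.mem_cons.mp hm with rfl | hm'
          · exact le_trans (h3 x List.mem_cons_self) (le_of_lt hx)
          · exact h3 m hm'
      · have hstep : pvStep (b, pvPri b) x = (b, pvPri b) := by simp [pvStep, hx]
        simp only [List.foldl_cons, hstep]
        obtain ⟨h1, h2, h3⟩ := ih b
        refine ⟨h1, ?_, ?_⟩
        · rcases List.mem_cons.mp h2 with h | h
          · rw [h]; exact List.mem_cons_self
          · exact List.mem_cons_of_mem _ (List.mem_cons_of_mem _ h)
        · intro m hm
          rcases List.mem_cons.mp hm with rfl | hm'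
          · exact h3 m List.mem_cons_self
          · rcases List.mem_cons.mp hm' with rfl | hm''
            · exact le_trans (h3 b List.mem_cons_self) (not_lt.mp hx)
            · exact h3 m (List.mem_cons_of_mem _ hm'')

lemma pvFold_stay (l : List String) : ∀ (b : String) (p : Int), (∀ m ∈ l, ¬ pvPri m < p) →
    l.foldl pvStep (b, p) = (b, p) := by
  induction l with
  | nil => intro b p _; rfl
  | cons m l ih =>
      intro b p h
      have hstep : pvStep (b, p) m = (b, p) := by simp [pvStep, h m (by simp)]
      simp only [List.foldl_cons, hstep]
      exact ih b p (fun m hm => h m (by simp [hm]))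

lemma pvCore (m0 : String) (rest : List String) :
    (match pvFindMood (PySem.Dict.counter (m0 :: rest)) pvMoodHierarchy with
     | some mood => mood
     | none => m0)
    = (rest.foldl pvStep (m0, pvPri m0)).1 := by
  by_cases hall : ∀ m ∈ m0 :: rest, pvPri m = 5
  · have h5 : pvPri m0 = 5 := hall m0 List.mem_cons_self
    have hstay := pvFold_stay rest m0 (pvPri m0)
      (fun m hm => by rw [hall m (List.mem_cons_of_mem _ hm), h5]; exact lt_irrefl 5)
    rw [hstay]
    have hc : ∀ h ∈ pvMoodHierarchy, h ∉ m0 :: rest := by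
      intro h hh hmem
      have h5' := hall h hmem
      fin_cases hh <;> simp [pvPri] at h5'
    simp [pvFindMood, pvMoodHierarchy, PySem.Dict.contains_counter,
      hc "joyful" (by decide), hc "focused" (by decide), hc "reflective" (by decide),
      hc "anxious" (by decide), hc "sad" (by decide)]
  · push Not at hall
    obtain ⟨mb, hmb, hne⟩ := hall
    obtain ⟨h1, h2, h3⟩ := pvFold_inv rest m0
    set r := List.foldl pvStep (m0, pvPri m0) rest with hr
    have hlt5 : r.2 < 5 := lt_of_le_of_lt (h3 mb hmb) (lt_of_le_of_ne (pvPri_bounds mb).2 hne)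
    have hge0 : 0 ≤ r.2 := h1 ▸ (pvPri_bounds r.1).1
    have hnotc : ∀ h : String, pvPri h < r.2 → h ∉ m0 :: rest := by
      intro h hph hmem
      exact absurd (h3 h hmem) (not_le.mpr hph)
    obtain ⟨v0, v1, v2, v3, v4⟩ := pvPri_val r.1
    have hcases : r.2 = 0 ∨ r.2 = 1 ∨ r.2 = 2 ∨ r.2 = 3 ∨ r.2 = 4 := by omega
    rcases hcases with h | h | h | h | h
    · have hx : r.1 = "joyful" := v0 (by omega)
      simp [pvFindMood, pvMoodHierarchy, PySem.Dict.contains_counter,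
        (hx ▸ h2 : "joyful" ∈ m0 :: rest), hx]
    · have hx : r.1 = "focused" := v1 (by omega)
      simp [pvFindMood, pvMoodHierarchy, PySem.Dict.contains_counter,
        hnotc "joyful" (by simp [pvPri, h]),
        (hx ▸ h2 : "focused" ∈ m0 :: rest), hx]
    · have hx : r.1 = "reflective" := v2 (by omega)
      simp [pvFindMood, pvMoodHierarchy, PySem.Dict.contains_counter,
        hnotc "joyful" (by simp [pvPri, h]), hnotc "focused" (by simp [pvPri, h]),
        (hx ▸ h2 : "reflective" ∈ m0 :: rest), hx]
    · have hx : r.1 = "anxious" := v3 (by omega)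
      simp [pvFindMood, pvMoodHierarchy, PySem.Dict.contains_counter,
        hnotc "joyful" (by simp [pvPri, h]), hnotc "focused" (by simp [pvPri, h]),
        hnotc "reflective" (by simp [pvPri, h]),
        (hx ▸ h2 : "anxious" ∈ m0 :: rest), hx]
    · have hx : r.1 = "sad" := v4 (by omega)
      simp [pvFindMood, pvMoodHierarchy, PySem.Dict.contains_counter,
        hnotc "joyful" (by simp [pvPri, h]), hnotc "focused" (by simp [pvPri, h]),
        hnotc "reflective" (by simp [pvPri, h]), hnotc "anxious" (by simp [pvPri, h]),
        (hx ▸ h2 : "sad" ∈ m0 :: rest), hx]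

-- ===== VERDICT (by name: the statement is the Claim_ definition above) =====
theorem blend_moods_spec : Claim_equal_blend_moods := by
  intro sb _
  unfold Spec_blend_moods blend_moods blend_moods_alt
  simp only [pvPri_getD]
  generalize sb.map (fun bloom => (PySem.Dict.mk bloom).getD "mood" "undefined") = moods
  cases moods with
  | nil => rfl
  | cons m0 rest =>
      have hkey : m0 ∈ (PySem.Dict.counter (m0 :: rest)).keys := by
        rw [PySem.Dict.keys_counter]
        simp [PySem.Set.mem_ofList]
      have hne : (PySem.Dict.counter (m0 :: rest)).items ≠ [] := by
        intro h
        simp only [PySem.Dict.keys, h, List.map_nil] at hkey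
        exact absurd hkey (List.not_mem_nil)
      rw [if_neg (by simp [List.isEmpty_iff, hne] :
        ¬ ((PySem.Dict.counter (m0 :: rest)).items.isEmpty = true))]
      exact pvCore m0 rest
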